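-- pv_equiv track=rewrite | github.com/kabirsrivastava3/python-practice | chapter-6/04-happy-number-using-recursion.py | sum_sq_digits
-- ===== SOURCE A (Python) =====
-- def sum_sq_digits(number):
--     totalSum = 0
--     while number > 0:
--         remainder = number%10
--         totalSum = totalSum + remainder * remainder
--         number = number // 10
--
--     if totalSum>10:
--         return sum_sq_digits(totalSum)
--     else:
--         return totalSum
-- ===== SOURCE B (Python) =====
-- def sum_sq_digits(number):
--     def dss(n):
--         return 0 if n <= 0 else (n % 10) ** 2 + dss(n // 10)
--     s = dss(number)
--     while s > 10:
--         s = dss(s)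
--     return s
-- ===== Notes on version B (the rewrite author's own statement) =====
-- stated objective: alternative
-- what changed: Swapped both decompositions: the digit loop becomes a recursive helper and the outer tail recursion becomes an iterative while loop.
import Mathlib
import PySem

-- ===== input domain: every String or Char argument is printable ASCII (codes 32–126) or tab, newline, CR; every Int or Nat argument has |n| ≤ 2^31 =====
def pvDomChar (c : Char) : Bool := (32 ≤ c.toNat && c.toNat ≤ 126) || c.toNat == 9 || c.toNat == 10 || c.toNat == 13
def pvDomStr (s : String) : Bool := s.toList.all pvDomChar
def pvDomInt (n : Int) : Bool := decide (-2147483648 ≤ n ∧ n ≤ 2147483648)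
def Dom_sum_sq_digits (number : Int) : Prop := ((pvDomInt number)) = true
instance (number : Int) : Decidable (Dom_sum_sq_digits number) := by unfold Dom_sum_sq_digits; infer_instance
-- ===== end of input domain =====

-- B swaps A's decomposition (recursive digit-square-sum helper + iterative outer loop instead of
-- inner while-loop + outer tail recursion); same cost, return value proved identical.
-- The outer iteration of both ports carries fuel only to make it total in Lean; on the stated
-- domain the chain reaches a value ≤ 10 long before the fuel runs out.

-- ===== PORT A =====
-- 'while number > 0: remainder = number%10; totalSum += remainder*remainder; number //= 10'
def pvSumSqLoop (totalSum : Int) (number : Int) : Int :=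
  if number > 0 then
    pvSumSqLoop (totalSum + PySem.Int.mod number 10 * PySem.Int.mod number 10)
      (PySem.Int.floordiv number 10)
  else totalSum
termination_by number.toNat
decreasing_by
  rw [PySem.Int.floordiv_eq_ediv_of_pos (by omega)]
  omega

-- the outer tail recursion of A, with fuel; on exhaustion it returns the current digit sum
def pvGoA : Nat → Int → Int
  | 0, number => pvSumSqLoop 0 number
  | f + 1, number =>
      let totalSum := pvSumSqLoop 0 number
      if totalSum > 10 then pvGoA f totalSum else totalSum

def sum_sq_digits (number : Int) : Int := pvGoA 10000 number

-- ===== PORT B =====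
-- 'def dss(n): return 0 if n <= 0 else (n % 10) ** 2 + dss(n // 10)'
def pvDss (n : Int) : Int :=
  if n ≤ 0 then 0
  else PySem.Int.mod n 10 ^ 2 + pvDss (PySem.Int.floordiv n 10)
termination_by n.toNat
decreasing_by
  rw [PySem.Int.floordiv_eq_ediv_of_pos (by omega)]
  omega

-- 'while s > 10: s = dss(s)', with fuel
def pvWhileB : Nat → Int → Int
  | 0, s => s
  | f + 1, s => if s > 10 then pvWhileB f (pvDss s) else s

def sum_sq_digits_alt (number : Int) : Int := pvWhileB 10000 (pvDss number)

-- ===== PRECONDITION & SPEC =====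
def Spec_sum_sq_digits (number : Int) (out : Int) : Prop := out = sum_sq_digits_alt number
instance (number : Int) (out : Int) : Decidable (Spec_sum_sq_digits number out) := by unfold Spec_sum_sq_digits; infer_instance

-- ===== CLAIM (what is proved, stated in full; the proofs are below) =====
def Claim_equal_sum_sq_digits : Prop := ∀ (number : Int), Dom_sum_sq_digits number → Spec_sum_sq_digits number (sum_sq_digits number)

-- ===== LEMMAS AND PROOFS =====

-- A's accumulator loop computes acc + B's recursive digit-square sum
theorem pvSumSqLoop_eq_dss (number : Int) :
    ∀ acc : Int, pvSumSqLoop acc number = acc + pvDss number := by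
  induction number using pvDss.induct with
  | case1 n h =>
      intro acc
      rw [pvSumSqLoop, pvDss]
      rw [if_neg (by omega : ¬ n > 0), if_pos h]
      ring
  | case2 n h ih =>
      intro acc
      rw [pvSumSqLoop, pvDss]
      rw [if_pos (by omega : n > 0), if_neg h]
      rw [ih]
      ring

theorem pvGoA_eq_whileB (f : Nat) : ∀ number : Int, pvGoA f number = pvWhileB f (pvDss number) := by
  induction f with
  | zero =>
      intro n
      simpa [pvGoA, pvWhileB] using pvSumSqLoop_eq_dss n 0
  | succ f ih =>
      intro n
      have h0 : pvSumSqLoop 0 n = pvDss n := by simpa using pvSumSqLoop_eq_dss n 0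
      simp only [pvGoA, pvWhileB, h0]
      split_ifs with h
      · exact ih (pvDss n)
      · rfl

-- ===== VERDICT (by name: the statement is the Claim_ definition above) =====
theorem sum_sq_digits_spec : Claim_equal_sum_sq_digits := by
  intro number _
  unfold Spec_sum_sq_digits sum_sq_digits sum_sq_digits_alt
  exact pvGoA_eq_whileB 10000 number
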